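-- pv_equiv track=rewrite | github.com/vidstige/aoc | 2023/17.py | is_legal
-- ===== SOURCE A (Python) =====
-- from typing import Dict, Iterable, List, Optional, Sequence, TextIO, Tuple
--
-- Position = Tuple[int, int]
--
-- def sub(a: Position, b: Position) -> Tuple[int, int]:
--     ax, ay = a
--     bx, by = b
--     return ax - bx, ay - by
--
-- def is_legal(history: Tuple) -> bool:
--     previous = (0, 0)
--     count = 0
--     for a, b in zip(history, history[1:]):
--         delta = sub(a, b)
--         if delta == previous:
--             count += 1
--             if count >= 3 - 1:
--                 return False
--         else:
--             count = 0
--         previous = delta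
--     return True
-- ===== SOURCE B (Python) =====
-- def sub(a, b):
--     ax, ay = a
--     bx, by = b
--     return ax - bx, ay - by
--
-- def is_legal(history):
--     deltas = [sub(a, b) for a, b in zip(history, history[1:])]
--     augmented = [(0, 0)] + deltas
--     return not any(x == y == z for x, y, z in
--                    zip(augmented, augmented[1:], augmented[2:]))
-- ===== Notes on version B (the rewrite author's own statement) =====
-- stated objective: simpler
-- what changed: Replaces the streaming run counter with state (previous, count) by a stateless sliding-window test: build the delta list once, prepend the initial (0,0), and check whether any three consecutive deltas are equal.
import Mathlib
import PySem

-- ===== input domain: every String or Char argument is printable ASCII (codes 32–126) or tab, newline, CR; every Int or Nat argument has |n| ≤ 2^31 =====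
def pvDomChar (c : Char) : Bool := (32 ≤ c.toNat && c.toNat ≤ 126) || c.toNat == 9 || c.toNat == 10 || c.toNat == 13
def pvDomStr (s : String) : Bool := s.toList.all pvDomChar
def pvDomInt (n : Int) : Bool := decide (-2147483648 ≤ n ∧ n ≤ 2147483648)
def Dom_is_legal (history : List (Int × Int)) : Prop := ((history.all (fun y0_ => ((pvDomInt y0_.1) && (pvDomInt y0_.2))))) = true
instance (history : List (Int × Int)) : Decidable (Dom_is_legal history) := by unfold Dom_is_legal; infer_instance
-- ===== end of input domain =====

-- B replaces A's streaming run counter by a stateless sliding-window triple test over the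
-- delta list (simpler decomposition, same O(n) cost).

-- ===== PORT A =====
-- helper sub(a, b)
def pySub (a b : Int × Int) : Int × Int := (a.1 - b.1, a.2 - b.2)

-- the for-loop of A: state (previous, count), early return False
def isLegalLoop : List ((Int × Int) × (Int × Int)) → (Int × Int) → Int → Bool
  | [], _, _ => true
  | (a, b) :: rest, previous, count =>
      let delta := pySub a b
      if delta = previous then
        if count + 1 ≥ 3 - 1 then false
        else isLegalLoop rest delta (count + 1)
      else isLegalLoop rest delta 0

def is_legal (history : List (Int × Int)) : Bool :=
  isLegalLoop (history.zip history.tail) ((0 : Int), (0 : Int)) 0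

-- ===== PORT B =====
-- not any(x == y == z for x, y, z in zip(aug, aug[1:], aug[2:]))
def anyTripleEq (aug : List (Int × Int)) : Bool :=
  (((aug.zip aug.tail).zip aug.tail.tail).any
    (fun t => t.1.1 == t.1.2 && t.1.2 == t.2))

def is_legal_alt (history : List (Int × Int)) : Bool :=
  let deltas := (history.zip history.tail).map (fun p => pySub p.1 p.2)
  let augmented := (((0 : Int), (0 : Int))) :: deltas
  !(anyTripleEq augmented)

-- ===== PRECONDITION & SPEC =====
def Spec_is_legal (history : List (Int × Int)) (out : Bool) : Prop := out = is_legal_alt history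
instance (history : List (Int × Int)) (out : Bool) : Decidable (Spec_is_legal history out) := by unfold Spec_is_legal; infer_instance

-- ===== CLAIM (what is proved, stated in full; the proofs are below) =====
def Claim_equal_is_legal : Prop := ∀ (history : List (Int × Int)), Dom_is_legal history → Spec_is_legal history (is_legal history)

-- ===== LEMMAS AND PROOFS =====

theorem anyTripleEq_cons3 (a b c : Int × Int) (l : List (Int × Int)) :
    anyTripleEq (a :: b :: c :: l) = ((a == b && b == c) || anyTripleEq (b :: c :: l)) := rfl

-- dropping a head that differs from the next element does not change the triple test
theorem anyTripleEq_drop_head (p d : Int × Int) (h : p ≠ d) (ds : List (Int × Int)) :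
    anyTripleEq (p :: d :: ds) = anyTripleEq (d :: ds) := by
  cases ds with
  | nil => rfl
  | cons e ds' =>
      rw [anyTripleEq_cons3]
      simp [beq_iff_eq, h]

-- the loop invariant: count encodes how many equal deltas immediately precede
theorem isLegalLoop_eq (ps : List ((Int × Int) × (Int × Int))) :
    ∀ prev : Int × Int,
      (isLegalLoop ps prev 0 = !anyTripleEq (prev :: ps.map (fun p => pySub p.1 p.2))) ∧
      (isLegalLoop ps prev 1 = !anyTripleEq (prev :: prev :: ps.map (fun p => pySub p.1 p.2))) := by
  induction ps with
  | nil =>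
      intro prev
      constructor <;> rfl
  | cons hd tl ih =>
      intro prev
      obtain ⟨a, b⟩ := hd
      constructor
      · show (if pySub a b = prev then _ else _) = _
        by_cases h : pySub a b = prev
        · rw [if_pos h]
          show isLegalLoop tl (pySub a b) 1 = _
          simp only [List.map]
          rw [(ih (pySub a b)).2, h]
        · rw [if_neg h]
          show isLegalLoop tl (pySub a b) 0 = _
          rw [(ih (pySub a b)).1]
          simp only [List.map]
          rw [anyTripleEq_drop_head prev (pySub a b) (Ne.symm h)]
      · show (if pySub a b = prev then _ else _) = _
        by_cases h : pySub a b = prev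
        · rw [if_pos h]
          show false = _
          simp only [List.map]
          cases tl with
          | nil =>
              rw [anyTripleEq_cons3]
              simp [h]
          | cons e tl' =>
              rw [anyTripleEq_cons3]
              simp [h]
        · rw [if_neg h]
          show isLegalLoop tl (pySub a b) 0 = _
          rw [(ih (pySub a b)).1]
          simp only [List.map]
          rw [anyTripleEq_cons3,
            anyTripleEq_drop_head prev (pySub a b) (Ne.symm h)]
          simp [Ne.symm h]

-- ===== VERDICT (by name: the statement is the Claim_ definition above) =====
theorem is_legal_spec : Claim_equal_is_legal := by
  intro history _
  unfold Spec_is_legal is_legal is_legal_alt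
  exact (isLegalLoop_eq (history.zip history.tail) ((0 : Int), (0 : Int))).1
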